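-- pv_equiv track=rewrite | github.com/NEELSAMEL23/DSA | 11.Stack/Python/11.MarksCompetition.py | find_greater_elements
-- ===== SOURCE A (Python) =====
-- def find_greater_elements(arr,n):
--
--     max_from_right = arr[-1]
--     result = [max_from_right]
--
--     for i in range(n-2, -1, -1):
--         if arr[i] >= max_from_right:
--             result.append(arr[i])
--             max_from_right = arr[i]
--
--     return result[::-1]
-- ===== SOURCE B (Python) =====
-- def find_greater_elements(arr, n):
--     # Monotonic stack, left to right: pushing a mark pops every smaller
--     # mark below it, so the stack always holds the marks that are >= all
--     # marks seen after them, in their original order.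
--     def push(stack, x):
--         while stack and stack[-1] < x:
--             stack.pop()
--         stack.append(x)
--
--     stack = []
--     for i in range(n - 1):
--         push(stack, arr[i])
--     push(stack, arr[-1])
--     return stack
-- ===== Notes on version B (the rewrite author's own statement) =====
-- stated objective: alternative
-- what changed: A scans right-to-left keeping a running maximum, appending winners and reversing at the end; B scans left-to-right with a monotonic stack (each new mark pops the smaller marks under it), so the stack is the answer in order with no reversal. Pre_ excludes exactly the inputs on which A raises IndexError (empty arr, or n > len(arr)+1).
import Mathlib
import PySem

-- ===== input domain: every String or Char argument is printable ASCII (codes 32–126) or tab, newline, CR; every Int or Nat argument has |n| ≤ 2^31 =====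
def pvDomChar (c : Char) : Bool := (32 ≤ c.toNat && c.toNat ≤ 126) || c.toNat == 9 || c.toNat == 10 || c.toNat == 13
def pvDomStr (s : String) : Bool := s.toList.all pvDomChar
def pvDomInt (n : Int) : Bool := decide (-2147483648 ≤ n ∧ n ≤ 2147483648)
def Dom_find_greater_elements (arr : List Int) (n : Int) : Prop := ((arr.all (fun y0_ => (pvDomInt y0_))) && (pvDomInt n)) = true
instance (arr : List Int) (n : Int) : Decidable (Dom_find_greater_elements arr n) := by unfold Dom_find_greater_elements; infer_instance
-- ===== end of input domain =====

-- B replaces A's right-to-left running-maximum scan (plus final reversal) by a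
-- left-to-right monotonic stack, so the answer comes out already in order.

-- ===== PORT A =====
-- A: max_from_right = arr[-1]; scan i = n-2 .. 0, append arr[i] when arr[i] >= max; reverse.
def find_greater_elements (arr : List Int) (n : Int) : List Int :=
  match PySem.List.pyGet? arr (-1) with
  | none => []            -- Python raises IndexError here; excluded by Pre_
  | some m0 =>
    let st := (PySem.List.pyRange (n - 2) (-1) (-1)).foldl
      (fun (s : Int × List Int) i =>
        match PySem.List.pyGet? arr i with
        | none => s       -- Python raises IndexError here; excluded by Pre_
        | some v => if s.1 ≤ v then (v, s.2 ++ [v]) else s)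
      (m0, [m0])
    st.2.reverse

-- ===== PORT B =====
-- B's push(stack, x): 'while stack and stack[-1] < x: stack.pop(); stack.append(x)',
-- the while loop transliterated as recursion popping from the end.
def pvPopWhile (st : List Int) (x : Int) : List Int :=
  match h : st.getLast? with
  | some t => if t < x then pvPopWhile st.dropLast x else st
  | none => st
termination_by st.length
decreasing_by
  have hne : st ≠ [] := by intro hnil; rw [hnil] at h; simp at h
  have hpos := List.length_pos_of_ne_nil hne
  simp [List.length_dropLast]; omega

-- B: stack = []; for i in range(n-1): push(stack, arr[i]); push(stack, arr[-1]); return stack.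
def find_greater_elements_alt (arr : List Int) (n : Int) : List Int :=
  let stack := (PySem.List.pyRange 0 (n - 1) 1).foldl
    (fun st i =>
      match PySem.List.pyGet? arr i with
      | none => st        -- Python raises IndexError here; excluded by Pre_
      | some x => pvPopWhile st x ++ [x])
    []
  match PySem.List.pyGet? arr (-1) with
  | none => stack         -- Python raises IndexError here; excluded by Pre_
  | some x => pvPopWhile stack x ++ [x]

-- ===== PRECONDITION & SPEC =====
-- Pre_ excludes exactly the inputs on which A raises IndexError: arr[-1] on an empty
-- list, or the loop reading arr[n-2] past the end when n > len(arr)+1.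
def Pre_find_greater_elements (arr : List Int) (n : Int) : Prop :=
  arr ≠ [] ∧ n ≤ (arr.length : Int) + 1
instance (arr : List Int) (n : Int) : Decidable (Pre_find_greater_elements arr n) := by
  unfold Pre_find_greater_elements; infer_instance

def pvWitness_find_greater_elements : List Int × Int := ([4, 2, 5, 1, 3], 5)

def Spec_find_greater_elements (arr : List Int) (n : Int) (out : List Int) : Prop :=
  out = find_greater_elements_alt arr n
instance (arr : List Int) (n : Int) (out : List Int) : Decidable (Spec_find_greater_elements arr n out) := by
  unfold Spec_find_greater_elements; infer_instance

-- ===== CLAIM (what is proved, stated in full; the proofs are below) =====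
def Claim_equal_find_greater_elements : Prop :=
  ∀ (arr : List Int) (n : Int), Dom_find_greater_elements arr n →
    Pre_find_greater_elements arr n →
    Spec_find_greater_elements arr n (find_greater_elements arr n)

-- ===== LEMMAS AND PROOFS =====

-- the maximum of xs ++ [m]
def pvMx (xs : List Int) (m : Int) : Int := xs.foldr max m

-- the elements of xs that are ≥ the maximum of everything to their right (within xs ++ [m])
def pvPick : List Int → Int → List Int
  | [], _ => []
  | v :: rest, m => (if pvMx rest m ≤ v then [v] else []) ++ pvPick rest m

-- the leaders of xs alone: elements ≥ everything strictly to their right in xs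
def pvL : List Int → List Int
  | [] => []
  | v :: rest => if rest.all (fun w => w ≤ v) then v :: pvL rest else pvL rest

theorem pvL_subset (xs : List Int) (x : Int) (hx : x ∈ pvL xs) : x ∈ xs := by
  induction xs with
  | nil => simp [pvL] at hx
  | cons v rest ih =>
    by_cases h : rest.all (fun w => w ≤ v)
    · simp only [pvL, if_pos h, List.mem_cons] at hx
      rcases hx with h1 | h2
      · simp [h1]
      · exact List.mem_cons_of_mem _ (ih h2)
    · simp only [pvL, if_neg h] at hx
      exact List.mem_cons_of_mem _ (ih hx)

theorem pvL_pairwise (xs : List Int) : (pvL xs).Pairwise (fun a b => b ≤ a) := by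
  induction xs with
  | nil => simp [pvL]
  | cons v rest ih =>
    by_cases h : rest.all (fun w => w ≤ v)
    · simp only [pvL, if_pos h]
      refine List.Pairwise.cons ?_ ih
      intro b hb
      exact of_decide_eq_true ((List.all_eq_true.mp h) b (pvL_subset rest b hb))
    · rw [pvL, if_neg h]; exact ih

-- popping from the end of a (non-strictly) decreasing stack keeps exactly the elements ≥ x
theorem pvPopWhile_eq_filter (st : List Int) (x : Int)
    (hs : st.Pairwise (fun a b => b ≤ a)) :
    pvPopWhile st x = st.filter (fun v => decide (x ≤ v)) := by
  induction st using List.reverseRecOn with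
  | nil => rw [pvPopWhile]; simp
  | append_singleton q t ih =>
    rw [pvPopWhile]
    rw [List.getLast?_concat]
    show (if t < x then pvPopWhile (q ++ [t]).dropLast x else q ++ [t])
        = List.filter (fun v => decide (x ≤ v)) (q ++ [t])
    by_cases hlt : t < x
    · rw [if_pos hlt, List.dropLast_concat]
      have hq : q.Pairwise (fun a b => b ≤ a) := (List.pairwise_append.mp hs).1
      rw [ih hq, List.filter_append]
      have hall : ∀ v ∈ q, t ≤ v := by
        intro v hv
        exact (List.pairwise_append.mp hs).2.2 v hv t (List.mem_singleton_self t)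
      rw [List.filter_singleton]
      simp [not_le.mpr hlt]
    · rw [if_neg hlt]
      rw [not_lt] at hlt
      have hall : ∀ v ∈ q, x ≤ v := by
        intro v hv
        exact le_trans hlt ((List.pairwise_append.mp hs).2.2 v hv t (List.mem_singleton_self t))
      rw [List.filter_append, List.filter_singleton]
      simp only [hlt, decide_true]
      rw [List.filter_eq_self.mpr (by intro v hv; simpa using hall v hv)]
      simp

-- appending x to the scanned sequence keeps the leaders ≥ x and adds x
theorem pvL_append (xs : List Int) (x : Int) :
    pvL (xs ++ [x]) = (pvL xs).filter (fun v => decide (x ≤ v)) ++ [x] := by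
  induction xs with
  | nil => simp [pvL]
  | cons v rest ih =>
    by_cases hr : rest.all (fun w => w ≤ v) <;> by_cases hx : x ≤ v
    · have hall : (rest ++ [x]).all (fun w => w ≤ v) := by
        simp [List.all_append, hr, hx]
      simp only [List.cons_append, pvL, hall, if_pos, ih, if_pos hr]
      simp [hx]
    · have hnall : ¬ (rest ++ [x]).all (fun w => w ≤ v) := by
        simp [List.all_append, hx]
      simp only [List.cons_append, pvL, if_neg hnall, ih, if_pos hr]
      simp [hx]
    · have hnall : ¬ (rest ++ [x]).all (fun w => w ≤ v) := by
        simp only [List.all_append, Bool.and_eq_true]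
        intro ⟨h1, _⟩; exact hr h1
      simp only [List.cons_append, pvL, if_neg hnall, ih, if_neg hr]
    · have hnall : ¬ (rest ++ [x]).all (fun w => w ≤ v) := by
        simp only [List.all_append, Bool.and_eq_true]
        intro ⟨h1, _⟩; exact hr h1
      simp only [List.cons_append, pvL, if_neg hnall, ih, if_neg hr]

-- B's stack loop over a plain list computes the leaders
theorem pvB_fold (xs : List Int) :
    xs.foldl (fun st v => pvPopWhile st v ++ [v]) [] = pvL xs := by
  induction xs using List.reverseRecOn with
  | nil => rfl
  | append_singleton q x ih =>
    rw [List.foldl_append, ih, List.foldl_cons, List.foldl_nil,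
      pvPopWhile_eq_filter _ _ (pvL_pairwise q), pvL_append]

-- pvMx bound as a conjunction
theorem pvMx_le_iff (xs : List Int) (m v : Int) :
    pvMx xs m ≤ v ↔ m ≤ v ∧ xs.all (fun w => w ≤ v) := by
  induction xs with
  | nil => simp [pvMx]
  | cons w rest ih =>
    simp only [pvMx, List.foldr_cons, max_le_iff, List.all_cons, Bool.and_eq_true,
      decide_eq_true_eq] at *
    constructor
    · rintro ⟨h1, h2⟩
      rcases ih.mp h2 with ⟨hm, hall⟩
      exact ⟨hm, h1, hall⟩
    · rintro ⟨hm, h1, hall⟩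
      exact ⟨h1, ih.mpr ⟨hm, hall⟩⟩

-- A's picked elements are the leaders that additionally dominate m
theorem pvPick_eq_filter (xs : List Int) (m : Int) :
    pvPick xs m = (pvL xs).filter (fun v => decide (m ≤ v)) := by
  induction xs with
  | nil => rfl
  | cons v rest ih =>
    by_cases hr : rest.all (fun w => w ≤ v)
    · simp only [pvPick, pvL, if_pos hr, ih, List.filter_cons]
      by_cases hm : m ≤ v
      · rw [if_pos ((pvMx_le_iff rest m v).mpr ⟨hm, hr⟩)]
        simp [hm]
      · rw [if_neg (fun h => hm ((pvMx_le_iff rest m v).mp h).1)]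
        simp [hm]
    · have : ¬ pvMx rest m ≤ v := fun h => hr ((pvMx_le_iff rest m v).mp h).2
      simp only [pvPick, pvL, if_neg hr, if_neg this, ih, List.nil_append]

-- A's loop, rephrased as a foldr over the processed prefix
theorem pvA_foldr (p : List Int) (m0 : Int) (acc : List Int) :
    p.foldr (fun v (s : Int × List Int) => if s.1 ≤ v then (v, s.2 ++ [v]) else s) (m0, acc)
      = (pvMx p m0, acc ++ (pvPick p m0).reverse) := by
  induction p with
  | nil => simp [pvMx, pvPick]
  | cons v rest ih =>
    simp only [List.foldr_cons, ih, pvMx, pvPick]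
    split_ifs with h
    · simp [max_eq_left h, List.append_assoc]
    · simp [max_eq_right (le_of_lt (lt_of_not_ge h))]

-- A's index loop over [k-1, …, 0] is that foldr over arr.take k
theorem pvA_loop (k : Nat) (arr : List Int) (hk : k ≤ arr.length) (s : Int × List Int) :
    (List.range k).foldl
        (fun (s : Int × List Int) (j : Nat) =>
          match PySem.List.pyGet? arr ((k : Int) - 1 - (j : Int)) with
          | none => s
          | some v => if s.1 ≤ v then (v, s.2 ++ [v]) else s) s
      = (arr.take k).foldr (fun v (s : Int × List Int) => if s.1 ≤ v then (v, s.2 ++ [v]) else s) s := by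
  induction k generalizing s with
  | zero => simp
  | succ k ih =>
    have hk' : k < arr.length := hk
    rw [List.range_succ_eq_map, List.foldl_cons, List.foldl_map]
    have hidx0 : (((k + 1 : Nat) : Int) - 1 - ((0 : Nat) : Int)) = ((k : Nat) : Int) := by
      push_cast; ring
    rw [hidx0, PySem.List.pyGet?_natCast, List.getElem?_eq_getElem hk']
    have hfun : ∀ (s' : Int × List Int) (j : Nat), j ∈ List.range k →
        (match PySem.List.pyGet? arr (((k + 1 : Nat) : Int) - 1 - ((Nat.succ j : Nat) : Int)) with
          | none => s'
          | some v => if s'.1 ≤ v then (v, s'.2 ++ [v]) else s')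
        = (match PySem.List.pyGet? arr ((k : Int) - 1 - (j : Int)) with
          | none => s'
          | some v => if s'.1 ≤ v then (v, s'.2 ++ [v]) else s') := by
      intro s' j _
      rw [show (((k + 1 : Nat) : Int) - 1 - ((Nat.succ j : Nat) : Int)) = ((k : Int) - 1 - (j : Int)) by
        push_cast; ring]
    rw [show (match some arr[k] with
        | none => s
        | some v => if s.1 ≤ v then (v, s.2 ++ [v]) else s)
        = (if s.1 ≤ arr[k] then (arr[k], s.2 ++ [arr[k]]) else s) from rfl]
    have hcongr := PySem.List.foldl_congr_mem
      (f := fun (x : Int × List Int) (y : Nat) =>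
        match PySem.List.pyGet? arr (((k + 1 : Nat) : Int) - 1 - ((Nat.succ y : Nat) : Int)) with
        | none => x
        | some v => if x.1 ≤ v then (v, x.2 ++ [v]) else x)
      (g := fun (x : Int × List Int) (y : Nat) =>
        match PySem.List.pyGet? arr ((k : Int) - 1 - (y : Int)) with
        | none => x
        | some v => if x.1 ≤ v then (v, x.2 ++ [v]) else x)
      (init := if s.1 ≤ arr[k] then (arr[k], s.2 ++ [arr[k]]) else s)
      (l := List.range k)
      (fun s' j hj => hfun s' j hj)
    rw [hcongr]
    rw [List.take_add_one, List.getElem?_eq_getElem hk']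
    simp only [Option.toList_some]
    rw [List.foldr_append, List.foldr_cons, List.foldr_nil]
    exact ih (le_of_lt hk') _

-- B's index loop over [0, …, k-1] is the plain stack fold over arr.take k
theorem pvB_loop (k : Nat) (arr : List Int) (hk : k ≤ arr.length) :
    (List.range k).foldl
        (fun st (j : Nat) =>
          match PySem.List.pyGet? arr ((j : Nat) : Int) with
          | none => st
          | some x => pvPopWhile st x ++ [x]) []
      = (arr.take k).foldl (fun st v => pvPopWhile st v ++ [v]) [] := by
  induction k with
  | zero => simp
  | succ k ih =>
    have hk' : k < arr.length := hk
    rw [List.range_succ, List.foldl_append, ih (le_of_lt hk'),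
      List.foldl_cons, List.foldl_nil,
      PySem.List.pyGet?_natCast, List.getElem?_eq_getElem hk',
      List.take_add_one, List.getElem?_eq_getElem hk']
    simp only [Option.toList_some]
    rw [List.foldl_append, List.foldl_cons, List.foldl_nil]

-- the descending range A iterates over, as a mapped ascending range
theorem pvRange_desc (n : Int) (hn : 1 ≤ n) :
    PySem.List.pyRange (n - 2) (-1) (-1)
      = (List.range (n - 1).toNat).map (fun (j : Nat) => (((n - 1).toNat : Nat) : Int) - 1 - (j : Int)) := by
  rw [show PySem.List.pyRange (n - 2) (-1) (-1)
      = List.map (fun (k : Nat) => (n - 2) + (-1) * (k : Int))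
          (List.range (if (-1 : Int) < n - 2 then (((n - 2) - (-1) + 1 - 1) / 1).toNat else 0)) from rfl]
  by_cases h : (-1 : Int) < n - 2
  · have h1 : (((n - 2) - (-1) + 1 - 1) / 1).toNat = (n - 1).toNat := by
      simp only [Int.ediv_one]; omega
    rw [if_pos h, h1]
    apply List.map_congr_left
    intro j hj
    have : ((n - 1).toNat : Int) = n - 1 := by omega
    rw [this]; ring
  · rw [if_neg h]
    have : (n - 1).toNat = 0 := by omega
    rw [this]; rfl

-- the ascending range B iterates over, as a mapped Nat range
theorem pvRange_asc (n : Int) :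
    PySem.List.pyRange 0 (n - 1) 1
      = (List.range (n - 1).toNat).map (fun (j : Nat) => ((j : Nat) : Int)) := by
  rw [PySem.List.pyRange_one]
  simp only [Int.sub_zero]
  apply List.map_congr_left
  intro j hj
  simp

-- ===== VERDICT (by name: the statement is the Claim_ definitions above) =====
theorem find_greater_elements_spec : Claim_equal_find_greater_elements := by
  intro arr n _ hpre
  obtain ⟨hne, hn⟩ := hpre
  unfold Spec_find_greater_elements find_greater_elements find_greater_elements_alt
  cases hlast : PySem.List.pyGet? arr (-1) with
  | none =>
    exfalso
    have hlen : 0 < arr.length := List.length_pos_of_ne_nil hne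
    simp [PySem.List.pyGet?, PySem.List.pyIdx?] at hlast
    omega
  | some last =>
    simp only []
    set k : Nat := (n - 1).toNat with hkdef
    have hk : k ≤ arr.length := by omega
    set p : List Int := arr.take k with hpdef
    -- A's side
    have hA : (PySem.List.pyRange (n - 2) (-1) (-1)).foldl
        (fun (s : Int × List Int) i =>
          match PySem.List.pyGet? arr i with
          | none => s
          | some v => if s.1 ≤ v then (v, s.2 ++ [v]) else s) (last, [last])
        = (pvMx p last, [last] ++ (pvPick p last).reverse) := by
      by_cases hn1 : 1 ≤ n
      · rw [pvRange_desc n hn1, List.foldl_map, pvA_loop k arr hk, pvA_foldr]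
      · have : (n - 1).toNat = 0 := by omega
        have hk0 : k = 0 := this
        have hrange : PySem.List.pyRange (n - 2) (-1) (-1) = [] := by
          rw [show PySem.List.pyRange (n - 2) (-1) (-1)
              = List.map (fun (kk : Nat) => (n - 2) + (-1) * (kk : Int))
                  (List.range (if (-1 : Int) < n - 2 then (((n - 2) - (-1) + 1 - 1) / 1).toNat else 0)) from rfl]
          rw [if_neg (by omega)]; rfl
        have hp : p = [] := by rw [hpdef, hk0]; rfl
        rw [hrange, List.foldl_nil, hp]
        simp [pvMx, pvPick]
    rw [hA]
    -- B's side: the stack loop computes the leaders of p, the final push filters ≥ last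
    have hB : (PySem.List.pyRange 0 (n - 1) 1).foldl
        (fun st i =>
          match PySem.List.pyGet? arr i with
          | none => st
          | some x => pvPopWhile st x ++ [x]) []
        = pvL p := by
      rw [pvRange_asc n, List.foldl_map, pvB_loop k arr hk, hpdef, pvB_fold]
    rw [hB, pvPopWhile_eq_filter _ _ (pvL_pairwise p), ← pvPick_eq_filter]
    simp
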